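-- pv_equiv track=rewrite | github.com/Rajchal/ticolops | backend/app/services/activity.py | _are_related_locations
-- ===== SOURCE A (Python) =====
-- def _are_related_locations(loc1: str, loc2: str) -> bool:
--     """Check if two locations are related (same directory, similar names, etc.)."""
--     if not loc1 or not loc2:
--         return False
--
--     # Same directory
--     if "/" in loc1 and "/" in loc2:
--         dir1 = "/".join(loc1.split("/")[:-1])
--         dir2 = "/".join(loc2.split("/")[:-1])
--         if dir1 == dir2:
--             return True
--
--     # Similar file names (edit distance or common prefix)
--     if len(loc1) > 3 and len(loc2) > 3:
--         # Simple similarity check - common prefix of at least 3 characters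
--         common_prefix_len = 0
--         for i in range(min(len(loc1), len(loc2))):
--             if loc1[i] == loc2[i]:
--                 common_prefix_len += 1
--             else:
--                 break
--
--         if common_prefix_len >= 3:
--             return True
--
--     return False
-- ===== SOURCE B (Python) =====
-- def _are_related_locations(loc1: str, loc2: str) -> bool:
--     """Check if two locations are related (same directory, similar names, etc.)."""
--     if not loc1 or not loc2:
--         return False
--
--     # Same directory (guards and check kept as in the original)
--     if "/" in loc1 and "/" in loc2:
--         if "/".join(loc1.split("/")[:-1]) == "/".join(loc2.split("/")[:-1]):
--             return True
--
--     # Closed-form prefix similarity: both strings longer than 3 chars and the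
--     # first three characters coincide (no counting loop needed).
--     return len(loc1) > 3 and len(loc2) > 3 and loc1[:3] == loc2[:3]
-- ===== Notes on version B (the rewrite author's own statement) =====
-- stated objective: simpler
-- what changed: The character-by-character common-prefix counting loop with break is replaced by a closed-form comparison of the first three characters (loc1[:3] == loc2[:3]), valid because the surrounding guard ensures both strings are longer than 3; the final result is returned as one boolean expression instead of the loop-then-threshold branch.
import Mathlib
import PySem

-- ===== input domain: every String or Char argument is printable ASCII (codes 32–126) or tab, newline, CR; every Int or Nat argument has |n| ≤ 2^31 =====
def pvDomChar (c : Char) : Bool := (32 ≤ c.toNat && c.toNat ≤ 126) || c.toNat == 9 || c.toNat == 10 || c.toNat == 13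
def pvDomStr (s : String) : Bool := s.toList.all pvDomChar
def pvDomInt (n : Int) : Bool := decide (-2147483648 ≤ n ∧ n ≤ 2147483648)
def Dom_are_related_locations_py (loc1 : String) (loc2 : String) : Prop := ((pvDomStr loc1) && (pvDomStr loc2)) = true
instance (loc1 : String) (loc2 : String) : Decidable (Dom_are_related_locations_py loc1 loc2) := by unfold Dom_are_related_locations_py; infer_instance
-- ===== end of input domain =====

-- B replaces A's character-counting common-prefix loop with a closed-form 3-character
-- slice comparison (simpler; valid because both strings are guaranteed longer than 3).

-- ===== PORT A =====
-- "/".join(loc.split("/")[:-1]) — the directory part; appears verbatim in both Pythons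
def pvDirname (l : List Char) : List Char :=
  PySem.Chars.join ['/'] (PySem.List.slice (PySem.Chars.splitOn l ['/']) none (some (-1)))

-- A's loop: for i in range(min(len1,len2)): if loc1[i]==loc2[i]: cpl += 1 else: break
def pvCommonPrefixLen : List Char → List Char → Nat
  | a :: as, b :: bs => if a = b then pvCommonPrefixLen as bs + 1 else 0
  | _, _ => 0

def are_related_locations_py (loc1 : String) (loc2 : String) : Bool :=
  let l1 := loc1.toList
  let l2 := loc2.toList
  if l1 = [] ∨ l2 = [] then false
  else if (PySem.Chars.isIn ['/'] l1 && PySem.Chars.isIn ['/'] l2)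
          && (pvDirname l1 = pvDirname l2 : Bool) then true
  else if 3 < l1.length ∧ 3 < l2.length then
    let commonPrefixLen := pvCommonPrefixLen l1 l2
    if 3 ≤ commonPrefixLen then true else false
  else false

-- ===== PORT B =====
def are_related_locations_py_alt (loc1 : String) (loc2 : String) : Bool :=
  let l1 := loc1.toList
  let l2 := loc2.toList
  if l1 = [] ∨ l2 = [] then false
  else if (PySem.Chars.isIn ['/'] l1 && PySem.Chars.isIn ['/'] l2)
          && (pvDirname l1 = pvDirname l2 : Bool) then true
  else decide (3 < l1.length) && decide (3 < l2.length)
       && (PySem.List.slice l1 none (some 3) = PySem.List.slice l2 none (some 3) : Bool)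

-- ===== PRECONDITION & SPEC =====
def Spec_are_related_locations_py (loc1 : String) (loc2 : String) (out : Bool) : Prop := out = are_related_locations_py_alt loc1 loc2
instance (loc1 : String) (loc2 : String) (out : Bool) : Decidable (Spec_are_related_locations_py loc1 loc2 out) := by unfold Spec_are_related_locations_py; infer_instance

-- ===== CLAIM (what is proved, stated in full; the proofs are below) =====
def Claim_equal_are_related_locations_py : Prop := ∀ (loc1 : String) (loc2 : String), Dom_are_related_locations_py loc1 loc2 → Spec_are_related_locations_py loc1 loc2 (are_related_locations_py loc1 loc2)

-- ===== LEMMAS AND PROOFS =====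

-- the prefix loop reaches k iff the k-character prefixes coincide (k within both lengths)
theorem pvCommonPrefixLen_ge_iff (k : Nat) :
    ∀ (l1 l2 : List Char), k ≤ l1.length → k ≤ l2.length →
      (k ≤ pvCommonPrefixLen l1 l2 ↔ l1.take k = l2.take k) := by
  induction k with
  | zero => intro l1 l2 _ _; simp
  | succ k ih =>
    intro l1 l2 h1 h2
    cases l1 with
    | nil => simp at h1
    | cons a as =>
      cases l2 with
      | nil => simp at h2
      | cons b bs =>
        simp only [List.length_cons, Nat.succ_le_succ_iff] at h1 h2
        by_cases hab : a = b
        · subst hab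
          have hih := ih as bs h1 h2
          simp only [pvCommonPrefixLen, if_true, List.take_succ_cons,
            List.cons.injEq, true_and]
          constructor
          · intro h; exact hih.mp (by omega)
          · intro h; have := hih.mpr h; omega
        · simp [pvCommonPrefixLen, hab]

theorem are_related_locations_py_eq (loc1 loc2 : String) :
    are_related_locations_py loc1 loc2 = are_related_locations_py_alt loc1 loc2 := by
  unfold are_related_locations_py are_related_locations_py_alt
  set l1 := loc1.toList with hl1
  set l2 := loc2.toList with hl2
  by_cases he : l1 = [] ∨ l2 = []
  · simp [he]
  · simp only [if_neg he]
    by_cases hd : ((PySem.Chars.isIn ['/'] l1 && PySem.Chars.isIn ['/'] l2)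
          && (pvDirname l1 = pvDirname l2 : Bool)) = true
    · simp [hd]
    · simp only [if_neg hd]
      by_cases hlen : 3 < l1.length ∧ 3 < l2.length
      · have h1 : (3 : Nat) ≤ l1.length := by omega
        have h2 : (3 : Nat) ≤ l2.length := by omega
        have := pvCommonPrefixLen_ge_iff 3 l1 l2 h1 h2
        have hsl : PySem.List.slice l1 none (some 3) = l1.take 3 := by
          rw [PySem.List.slice_to l1 (b := 3) (by norm_num)]; rfl
        have hsl2 : PySem.List.slice l2 none (some 3) = l2.take 3 := by
          rw [PySem.List.slice_to l2 (b := 3) (by norm_num)]; rfl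
        simp only [hsl, hsl2, hlen.1, hlen.2, decide_true, Bool.true_and]
        by_cases hc : 3 ≤ pvCommonPrefixLen l1 l2
        · simp [hc, this.mp hc]
        · have : ¬ (l1.take 3 = l2.take 3) := fun h => hc (this.mpr h)
          simp [hc, this]
      · simp only [if_neg hlen]
        rcases not_and_or.mp hlen with h | h <;> simp [h]

-- ===== VERDICT (by name: the statement is the Claim_ definition above) =====
theorem are_related_locations_py_spec : Claim_equal_are_related_locations_py := by
  intro loc1 loc2 _
  unfold Spec_are_related_locations_py
  exact are_related_locations_py_eq loc1 loc2
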